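-- pv_equiv track=rewrite | github.com/AndrewFasano/unblob | unblob/parser.py | alternative
-- ===== SOURCE A (Python) =====
-- import itertools
--
-- def alternative(s):
--     spl = [
--         "".join(body)
--         for x, body in itertools.groupby(s, lambda item: item == "|")
--         if not x
--     ]
--     alternatives = "|".join(spl)
--     return f"({alternatives})"
-- ===== SOURCE B (Python) =====
-- def alternative(s):
--     parts = [p for p in s.split("|") if p]
--     return f"({'|'.join(parts)})"
-- ===== Notes on version B (the rewrite author's own statement) =====
-- stated objective: simpler
-- what changed: Replaces the itertools.groupby run-grouping over individual characters with str.split on the pipe separator, filtering out empty fragments and rejoining, a shorter delimiter-based decomposition.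
import Mathlib
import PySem

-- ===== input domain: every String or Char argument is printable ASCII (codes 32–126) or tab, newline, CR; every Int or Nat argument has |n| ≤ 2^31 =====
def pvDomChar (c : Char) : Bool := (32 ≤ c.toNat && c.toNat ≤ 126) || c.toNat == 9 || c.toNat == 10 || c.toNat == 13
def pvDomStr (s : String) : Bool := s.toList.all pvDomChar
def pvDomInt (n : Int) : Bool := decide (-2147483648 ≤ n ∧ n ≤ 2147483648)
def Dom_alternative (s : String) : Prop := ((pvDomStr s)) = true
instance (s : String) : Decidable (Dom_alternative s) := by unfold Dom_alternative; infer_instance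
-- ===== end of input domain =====

-- B replaces groupby run-grouping with split('|') + drop-empty + rejoin (simpler decomposition).

-- ===== PORT A =====
-- itertools.groupby(s, lambda item: item == "|"): maximal runs of equal key, in order.
def pyGroupby (l : List Char) : List (Bool × List Char) :=
  match l with
  | [] => []
  | c :: rest =>
    ((c == '|'), c :: rest.takeWhile (fun d => (d == '|') == (c == '|'))) ::
      pyGroupby (rest.dropWhile (fun d => (d == '|') == (c == '|')))
termination_by l.length
decreasing_by
  simp only [List.length_cons]
  exact Nat.lt_succ_of_le (List.length_dropWhile_le _ _)

def alternative (s : String) : String :=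
  let spl := ((pyGroupby s.toList).filter (fun p => !p.1)).map (fun p => p.2)
  let alternatives := PySem.Chars.join ['|'] spl
  String.ofList ('(' :: alternatives ++ [')'])

-- ===== PORT B =====
def alternative_alt (s : String) : String :=
  let parts := PySem.Chars.splitOn s.toList ['|']
  let spl := parts.filter (fun p => !p.isEmpty)
  String.ofList ('(' :: PySem.Chars.join ['|'] spl ++ [')'])

-- ===== PRECONDITION & SPEC =====
def Spec_alternative (s : String) (out : String) : Prop := out = alternative_alt s
instance (s : String) (out : String) : Decidable (Spec_alternative s out) := by unfold Spec_alternative; infer_instance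

-- ===== CLAIM (what is proved, stated in full; the proofs are below) =====
def Claim_equal_alternative : Prop := ∀ (s : String), Dom_alternative s → Spec_alternative s (alternative s)

-- ===== LEMMAS AND PROOFS =====

-- proof-side recursive characterization of splitOn on a single-char separator
def mySplit : List Char → List Char → List (List Char)
  | [], cur => [cur.reverse]
  | c :: rest, cur => if c = '|' then cur.reverse :: mySplit rest [] else mySplit rest (c :: cur)

theorem go_spec (fuel : Nat) : ∀ (l cur : List Char) (acc : List (List Char)),
    l.length ≤ fuel →
    PySem.Chars.splitOn.go ['|'] fuel l cur acc = acc.reverse ++ mySplit l cur := by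
  induction fuel with
  | zero =>
    intro l cur acc h
    have : l = [] := List.length_eq_zero_iff.mp (Nat.le_zero.mp h)
    subst this
    simp [PySem.Chars.splitOn.go, mySplit]
  | succ n ih =>
    intro l cur acc h
    match l with
    | [] => simp [PySem.Chars.splitOn.go, mySplit]
    | c :: rest =>
      simp only [PySem.Chars.splitOn.go]
      by_cases hc : c = '|'
      · subst hc
        simp only [List.isPrefixOf_cons₂_self, List.isPrefixOf_nil_left, if_pos]
        rw [show (['|'].length) = 1 from rfl]
        simp only [List.drop_succ_cons, List.drop_zero]
        rw [ih rest [] (cur.reverse :: acc) (by simpa using Nat.le_of_succ_le_succ h)]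
        simp [mySplit]
      · have hpre : ['|'].isPrefixOf (c :: rest) = false := by
          simp [List.isPrefixOf]
          exact fun h' => absurd h'.symm hc
        rw [hpre]
        simp only [Bool.false_eq_true, if_false]
        rw [ih rest (c :: cur) acc (by simpa using Nat.le_of_succ_le_succ h)]
        simp [mySplit, hc]

theorem splitOn_eq_mySplit (l : List Char) :
    PySem.Chars.splitOn l ['|'] = mySplit l [] := by
  unfold PySem.Chars.splitOn
  rw [go_spec (l.length + 1) l [] [] (Nat.le_succ _)]
  simp

-- A's kept groups, as a function
def keptGroups (l : List Char) : List (List Char) :=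
  ((pyGroupby l).filter (fun p => !p.1)).map (fun p => p.2)

theorem keptGroups_dropPipes (l : List Char) :
    keptGroups (l.dropWhile (fun d => d == '|')) = keptGroups l := by
  induction l with
  | nil => rfl
  | cons c r ih =>
    by_cases hc : c = '|'
    · subst hc
      rw [List.dropWhile_cons_of_pos (by simp)]
      conv_rhs => rw [keptGroups, pyGroupby]
      rw [show (fun d => (d == '|') == ('|' == '|')) = (fun d => d == '|') from funext fun d => by simp]
      simp [keptGroups]
    · rw [List.dropWhile_cons_of_neg (by simp [hc])]

theorem keptGroups_pipe (r : List Char) :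
    keptGroups ('|' :: r) = keptGroups r := by
  conv_lhs => rw [keptGroups, pyGroupby]
  simp only [beq_self_eq_true, List.filter_cons, Bool.not_true, Bool.false_eq_true, if_false]
  rw [show ((fun d => (d == '|') == true)) = (fun d => d == '|') from funext fun d => by simp]
  exact keptGroups_dropPipes r

theorem keptGroups_cons_ne (c : Char) (rest : List Char) (hc : c ≠ '|') :
    keptGroups (c :: rest) =
      (c :: rest.takeWhile (fun d => !(d == '|'))) ::
        keptGroups (rest.dropWhile (fun d => !(d == '|'))) := by
  have hkey : (c == '|') = false := by simp [hc]
  conv_lhs => rw [keptGroups, pyGroupby]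
  simp [hkey, keptGroups]

theorem mySplit_filter (l : List Char) : ∀ cur : List Char,
    (mySplit l cur).filter (fun p => !p.isEmpty) =
      if cur.isEmpty then keptGroups l
      else (cur.reverse ++ l.takeWhile (fun d => !(d == '|'))) ::
             keptGroups (l.dropWhile (fun d => !(d == '|'))) := by
  induction l with
  | nil =>
    intro cur
    match cur with
    | [] => simp [mySplit, keptGroups, pyGroupby]
    | c :: cs => simp [mySplit, keptGroups, pyGroupby]
  | cons c rest ih =>
    intro cur
    by_cases hc : c = '|'
    · subst hc
      have e1 : mySplit ('|' :: rest) cur = cur.reverse :: mySplit rest [] := by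
        simp [mySplit]
      have htw : ('|' :: rest).takeWhile (fun d => !(d == '|')) = [] :=
        List.takeWhile_cons_of_neg (by simp)
      have hdw : ('|' :: rest).dropWhile (fun d => !(d == '|')) = '|' :: rest :=
        List.dropWhile_cons_of_neg (by simp)
      rw [e1, List.filter_cons, ih [], htw, hdw, keptGroups_pipe]
      match cur with
      | [] => simp
      | d :: ds => simp
    · have e2 : mySplit (c :: rest) cur = mySplit rest (c :: cur) := by
        simp [mySplit, hc]
      have htw : (c :: rest).takeWhile (fun d => !(d == '|')) =
          c :: rest.takeWhile (fun d => !(d == '|')) :=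
        List.takeWhile_cons_of_pos (by simp [hc])
      have hdw : (c :: rest).dropWhile (fun d => !(d == '|')) =
          rest.dropWhile (fun d => !(d == '|')) :=
        List.dropWhile_cons_of_pos (by simp [hc])
      rw [e2, ih (c :: cur), htw, hdw]
      match cur with
      | [] => simp [keptGroups_cons_ne c rest hc]
      | d :: ds => simp

theorem kept_eq (l : List Char) :
    (PySem.Chars.splitOn l ['|']).filter (fun p => !p.isEmpty) = keptGroups l := by
  rw [splitOn_eq_mySplit, mySplit_filter]
  simp

-- ===== VERDICT (by name: the statement is the Claim_ definition above) =====
theorem alternative_spec : Claim_equal_alternative := by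
  intro s _
  unfold Spec_alternative alternative alternative_alt
  simp only [kept_eq]
  rfl
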